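-- pv_equiv track=rewrite | github.com/gadji15/YouTok | services/video-worker/video_worker/pipeline/transcript_cleanup.py | _dedupe_immediate_words
-- ===== SOURCE A (Python) =====
-- def _dedupe_immediate_words(text: str) -> str:
--     tokens = text.split()
--     if len(tokens) < 3:
--         return text
--
--     out: list[str] = []
--     prev = None
--     repeat = 0
--
--     for tok in tokens:
--         k = tok.lower()
--         if prev is not None and k == prev:
--             repeat += 1
--             # Keep at most 2 immediate repeats.
--             if repeat >= 2:
--                 continue
--         else:
--             repeat = 0
--         out.append(tok)
--         prev = k
--
--     return " ".join(out)
-- ===== SOURCE B (Python) =====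
-- import itertools
--
-- def _dedupe_immediate_words(text: str) -> str:
--     tokens = text.split()
--     if len(tokens) < 3:
--         return text
--     out: list[str] = []
--     for _, group in itertools.groupby(tokens, key=str.lower):
--         out.extend(itertools.islice(group, 2))
--     return " ".join(out)
-- ===== Notes on version B (the rewrite author's own statement) =====
-- stated objective: idiomatic
-- what changed: Replaces the prev/repeat counter state machine with itertools.groupby on the lowercased key plus islice(group, 2), i.e. a grouping-then-slice decomposition with no manual run-tracking state.
import Mathlib
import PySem

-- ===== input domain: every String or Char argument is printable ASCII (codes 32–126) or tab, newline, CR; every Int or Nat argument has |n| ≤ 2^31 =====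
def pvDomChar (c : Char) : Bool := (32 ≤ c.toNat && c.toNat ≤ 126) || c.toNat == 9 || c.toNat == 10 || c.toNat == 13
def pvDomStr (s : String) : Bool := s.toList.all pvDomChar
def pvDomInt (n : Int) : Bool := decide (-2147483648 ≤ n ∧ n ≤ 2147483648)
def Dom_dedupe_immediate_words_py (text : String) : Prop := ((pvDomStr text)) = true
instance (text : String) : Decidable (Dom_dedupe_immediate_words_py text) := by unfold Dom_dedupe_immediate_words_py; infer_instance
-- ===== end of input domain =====

-- B collapses runs of case-insensitively-equal words to at most two via a grouping-then-slice
-- decomposition (groupby + islice) instead of A's prev/repeat counter state machine; idiomatic, same cost.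

-- ===== PORT A =====
-- loop state: (out, prev, repeat); 'continue' = return the state unchanged after the repeat bump
def pvAStep (st : List String × Option String × Int) (tok : String) :
    List String × Option String × Int :=
  let k := PySem.Str.lower tok
  if st.2.1 = some k then
    let rep := st.2.2 + 1
    if rep ≥ 2 then (st.1, st.2.1, rep)
    else (st.1 ++ [tok], some k, rep)
  else (st.1 ++ [tok], some k, 0)

def dedupe_immediate_words_py (text : String) : String :=
  let tokens := PySem.Str.split₀ text
  if tokens.length < 3 then text
  else
    let st := tokens.foldl pvAStep ([], none, 0)
    PySem.Str.join " " st.1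

-- ===== PORT B =====
-- itertools.groupby on the lowercase key: split tokens into maximal runs of equal key
def pvGroups : List String → List (List String)
  | [] => []
  | t :: ts =>
    (t :: ts.takeWhile (fun s => PySem.Str.lower s == PySem.Str.lower t)) ::
      pvGroups (ts.dropWhile (fun s => PySem.Str.lower s == PySem.Str.lower t))
termination_by ts => ts.length
decreasing_by
  exact Nat.lt_succ_of_le (List.length_dropWhile_le _ _)

def dedupe_immediate_words_py_alt (text : String) : String :=
  let tokens := PySem.Str.split₀ text
  if tokens.length < 3 then text
  else
    -- islice(group, 2) = take 2 of each run; out.extend = flatMap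
    PySem.Str.join " " ((pvGroups tokens).flatMap (fun g => g.take 2))

-- ===== PRECONDITION & SPEC =====
def Spec_dedupe_immediate_words_py (text : String) (out : String) : Prop := out = dedupe_immediate_words_py_alt text
instance (text : String) (out : String) : Decidable (Spec_dedupe_immediate_words_py text out) := by unfold Spec_dedupe_immediate_words_py; infer_instance

-- ===== CLAIM (what is proved, stated in full; the proofs are below) =====
def Claim_equal_dedupe_immediate_words_py : Prop := ∀ (text : String), Dom_dedupe_immediate_words_py text → Spec_dedupe_immediate_words_py text (dedupe_immediate_words_py text)

-- ===== LEMMAS AND PROOFS =====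

-- once repeat ≥ 2 ... actually once rep ≥ 1, every further token of the same key is skipped
theorem pvA_skip_run (k : String) (run : List String)
    (hk : ∀ s ∈ run, PySem.Str.lower s = k) (out : List String) (r : Int) (hr : 1 ≤ r) :
    run.foldl pvAStep (out, some k, r) = (out, some k, r + run.length) := by
  induction run generalizing r with
  | nil => simp
  | cons s rs ih =>
    have hs : PySem.Str.lower s = k := hk s (by simp)
    have step : pvAStep (out, some k, r) s = (out, some k, r + 1) := by
      simp [pvAStep, hs]; omega
    have := ih (fun x hx => hk x (by simp [hx])) (r + 1) (by omega)
    simp only [List.foldl_cons, step, this, List.length_cons]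
    have he : r + 1 + (rs.length : Int) = r + ((rs.length + 1 : Nat) : Int) := by push_cast; ring
    rw [he]

-- main loop invariant: starting with a prev that does not match the head's key,
-- the loop's output is out ++ first-two-of-each-group
theorem pvA_main (ts : List String) (out : List String) (prev : Option String) (r : Int)
    (hprev : ∀ t ts', ts = t :: ts' → prev ≠ some (PySem.Str.lower t)) :
    (ts.foldl pvAStep (out, prev, r)).1 = out ++ (pvGroups ts).flatMap (fun g => g.take 2) := by
  induction hn : ts.length using Nat.strong_induction_on generalizing ts out prev r with
  | _ n ih =>
  cases ts with
  | nil => simp [pvGroups]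
  | cons t ts' =>
    have hne : prev ≠ some (PySem.Str.lower t) := hprev t ts' rfl
    have step1 : pvAStep (out, prev, r) t =
        (out ++ [t], some (PySem.Str.lower t), 0) := by
      simp [pvAStep, hne]
    set k := PySem.Str.lower t with hkdef
    set p := fun s => PySem.Str.lower s == k with hp
    have hsplit : ts' = ts'.takeWhile p ++ ts'.dropWhile p := (List.takeWhile_append_dropWhile).symm
    have hrunk : ∀ s ∈ ts'.takeWhile p, PySem.Str.lower s = k := by
      intro s hs
      have := List.mem_takeWhile_imp hs
      simpa [hp] using this
    -- fold over t then the run then the rest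
    cases hrun : ts'.takeWhile p with
    | nil =>
      -- empty run: group is [t]
      have hdrop : ts'.dropWhile p = ts' := by
        cases ts' with
        | nil => rfl
        | cons u us =>
          have : p u = false := by
            by_contra hpu
            have : p u = true := by revert hpu; cases p u <;> simp
            simp [this] at hrun
          simp [this]
      have hrest : ∀ u us, ts' = u :: us → (some k : Option String) ≠ some (PySem.Str.lower u) := by
        intro u us he
        subst he
        have : p u = false := by
          by_contra hpu
          have : p u = true := by revert hpu; cases p u <;> simp
          simp [this] at hrun
        simp [hp] at this
        simp
        intro hc
        exact this hc.symm
      have := ih ts'.length (by simp [← hn]) ts' (out ++ [t]) (some k) 0 hrest rfl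
      simp only [List.foldl_cons, step1, this]
      simp [pvGroups, ← hkdef, ← hp, hrun, hdrop]
    | cons s rs =>
      -- nonempty run: first element appended (rep 1), rest skipped
      have hsk : PySem.Str.lower s = k := hrunk s (by rw [hrun]; simp)
      have hrsk : ∀ x ∈ rs, PySem.Str.lower x = k := fun x hx => hrunk x (by rw [hrun]; simp [hx])
      have step2 : pvAStep (out ++ [t], some k, 0) s = (out ++ [t, s], some k, 1) := by
        simp [pvAStep, hsk]
      have hskip := pvA_skip_run k rs hrsk (out ++ [t, s]) 1 (le_refl 1)
      have hdropne : ∀ u us, ts'.dropWhile p = u :: us → (some k : Option String) ≠ some (PySem.Str.lower u) := by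
        intro u us he
        have : p u = false := by
          have := List.head?_dropWhile_not p ts'
          rw [he] at this
          simpa using this
        simp [hp] at this
        simp
        intro hc
        exact this hc.symm
      have hdlen : (ts'.dropWhile p).length < n := by
        have h1 : (ts'.dropWhile p).length ≤ ts'.length := List.length_dropWhile_le _ _
        simp [List.length_cons] at hn
        omega
      have hrec := ih (ts'.dropWhile p).length hdlen (ts'.dropWhile p) (out ++ [t, s]) (some k) (1 + rs.length) (hdropne) rfl
      calc ((t :: ts').foldl pvAStep (out, prev, r)).1
          = (ts'.foldl pvAStep (out ++ [t], some k, 0)).1 := by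
            simp only [List.foldl_cons, step1]
        _ = ((ts'.takeWhile p ++ ts'.dropWhile p).foldl pvAStep (out ++ [t], some k, 0)).1 := by
            rw [← hsplit]
        _ = ((ts'.dropWhile p).foldl pvAStep (out ++ [t, s], some k, 1 + rs.length)).1 := by
            rw [List.foldl_append, hrun]
            simp only [List.foldl_cons, step2, hskip]
        _ = out ++ [t, s] ++ (pvGroups (ts'.dropWhile p)).flatMap (fun g => g.take 2) := hrec
        _ = out ++ (pvGroups (t :: ts')).flatMap (fun g => g.take 2) := by
            simp [pvGroups, ← hkdef, ← hp, hrun]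

-- ===== VERDICT (by name: the statement is the Claim_ definition above) =====
theorem dedupe_immediate_words_py_spec : Claim_equal_dedupe_immediate_words_py := by
  intro text _
  unfold Spec_dedupe_immediate_words_py dedupe_immediate_words_py dedupe_immediate_words_py_alt
  simp only []
  by_cases h : (PySem.Str.split₀ text).length < 3
  · simp [h]
  · simp only [h, if_false]
    have := pvA_main (PySem.Str.split₀ text) [] none 0 (by intro t ts' _ hc; cases hc)
    rw [this]
    simp
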